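-- pv_equiv track=rewrite | github.com/MrBrantCode/unitest_baseline | mut_generate/mist_train_cf/cf_77780/solution.py | custom_blender
-- ===== SOURCE A (Python) =====
-- from typing import Tuple
--
-- def custom_blender(s1: str, s2: str) -> Tuple[str, int]:
--     bypass_count = 0
--     result = []
--
--     i = j = 0
--     while i<len(s1) or j<len(s2):
--         if i<len(s1):
--             if  not s1[i].isdigit():
--                 result.append(s1[i])
--             else:
--                 bypass_count += 1
--             i += 1
--
--         if j<len(s2):
--             if not s2[j].isdigit():
--                 result.append(s2[j])
--             else:
--                 bypass_count += 1
--             j += 1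
--
--     return "".join(result), bypass_count
-- ===== SOURCE B (Python) =====
-- from typing import Tuple
--
-- def custom_blender(s1: str, s2: str) -> Tuple[str, int]:
--     n = min(len(s1), len(s2))
--     merged = "".join(a + b for a, b in zip(s1, s2)) + s1[n:] + s2[n:]
--     result = "".join(c for c in merged if not c.isdigit())
--     return result, len(merged) - len(result)
-- ===== Notes on version B (the rewrite author's own statement) =====
-- stated objective: faster
-- what changed: Replaces A's fused two-index while loop with two bulk passes: build the full interleaving via zip plus leftover slices, then filter out digits, deriving bypass_count as the length difference; the bulk join/genexpr passes beat A's per-character loop by a constant factor.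
import Mathlib
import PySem

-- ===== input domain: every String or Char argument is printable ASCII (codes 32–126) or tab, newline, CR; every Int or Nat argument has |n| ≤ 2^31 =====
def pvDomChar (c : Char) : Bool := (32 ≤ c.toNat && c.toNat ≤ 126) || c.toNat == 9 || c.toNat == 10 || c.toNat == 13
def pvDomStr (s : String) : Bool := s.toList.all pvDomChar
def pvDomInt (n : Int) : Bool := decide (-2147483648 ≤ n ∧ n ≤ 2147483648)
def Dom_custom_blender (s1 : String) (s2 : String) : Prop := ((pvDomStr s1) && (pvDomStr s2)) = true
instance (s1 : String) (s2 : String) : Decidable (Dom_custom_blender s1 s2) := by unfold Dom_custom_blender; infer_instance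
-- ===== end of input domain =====

-- B interleaves the two strings in one pass (zip + leftover tails) and filters digits in a
-- second pass, deriving the bypass count as a length difference instead of an inline counter.

-- ===== PORT A =====
-- one append/count step of A's loop body (the shared if/else on a character)
def pvStepA (c : Char) (res : List Char) (cnt : Int) : List Char × Int :=
  if ¬ PySem.Chars.isdigit c then (res ++ [c], cnt) else (res, cnt + 1)

-- A's while loop: each iteration consumes s1[i] (if any) then s2[j] (if any)
def pvLoopA : List Char → List Char → List Char → Int → List Char × Int
  | [], [], res, cnt => (res, cnt)
  | a :: l1, b :: l2, res, cnt =>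
      let (res, cnt) := pvStepA a res cnt
      let (res, cnt) := pvStepA b res cnt
      pvLoopA l1 l2 res cnt
  | a :: l1, [], res, cnt =>
      let (res, cnt) := pvStepA a res cnt
      pvLoopA l1 [] res cnt
  | [], b :: l2, res, cnt =>
      let (res, cnt) := pvStepA b res cnt
      pvLoopA [] l2 res cnt

def custom_blender (s1 : String) (s2 : String) : String × Int :=
  let (res, cnt) := pvLoopA s1.toList s2.toList [] 0
  (String.ofList res, cnt)

-- ===== PORT B =====
def custom_blender_alt (s1 : String) (s2 : String) : String × Int :=
  let l1 := s1.toList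
  let l2 := s2.toList
  let n := min l1.length l2.length
  let merged := ((l1.zip l2).flatMap (fun p => [p.1, p.2])) ++ l1.drop n ++ l2.drop n
  let result := merged.filter (fun c => !PySem.Chars.isdigit c)
  (String.ofList result, (merged.length : Int) - (result.length : Int))

-- ===== PRECONDITION & SPEC =====
def Spec_custom_blender (s1 : String) (s2 : String) (out : String × Int) : Prop := out = custom_blender_alt s1 s2
instance (s1 : String) (s2 : String) (out : String × Int) : Decidable (Spec_custom_blender s1 s2 out) := by unfold Spec_custom_blender; infer_instance

-- ===== CLAIM (what is proved, stated in full; the proofs are below) =====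
def Claim_equal_custom_blender : Prop := ∀ (s1 : String) (s2 : String), Dom_custom_blender s1 s2 → Spec_custom_blender s1 s2 (custom_blender s1 s2)

-- ===== LEMMAS AND PROOFS =====

-- proof-only merge of two lists (the interleaving both programs traverse)
def pvMergeL : List Char → List Char → List Char
  | [], l2 => l2
  | l1, [] => l1
  | a :: l1, b :: l2 => a :: b :: pvMergeL l1 l2

lemma pvMergeL_eq_zip : ∀ (l1 l2 : List Char),
    ((l1.zip l2).flatMap (fun p => [p.1, p.2])) ++ l1.drop (min l1.length l2.length)
      ++ l2.drop (min l1.length l2.length) = pvMergeL l1 l2 := by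
  intro l1
  induction l1 with
  | nil => intro l2; simp [pvMergeL]
  | cons a l1 ih =>
    intro l2
    cases l2 with
    | nil => simp [pvMergeL]
    | cons b l2 =>
      simp only [List.zip_cons_cons, List.flatMap_cons, List.length_cons, pvMergeL]
      have h : min (l1.length + 1) (l2.length + 1) = min l1.length l2.length + 1 := by omega
      simp [h, ih l2]

lemma pvLoopA_eq : ∀ (l1 l2 : List Char) (res : List Char) (cnt : Int),
    pvLoopA l1 l2 res cnt =
      (res ++ (pvMergeL l1 l2).filter (fun c => !PySem.Chars.isdigit c),
       cnt + ((pvMergeL l1 l2).filter (fun c => PySem.Chars.isdigit c)).length) := by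
  intro l1 l2
  fun_induction pvMergeL l1 l2 with
  | case1 l2 =>
    intro res cnt
    induction l2 generalizing res cnt with
    | nil => simp [pvLoopA]
    | cons b l2 ih =>
      by_cases hb : PySem.Chars.isdigit b = true <;>
        (simp [pvLoopA, pvStepA, hb, ih]; try ring)
  | case2 l1 h =>
    intro res cnt
    match l1, h with
    | a :: l1, _ =>
      clear h
      induction l1 generalizing a res cnt with
      | nil =>
        by_cases ha : PySem.Chars.isdigit a = true <;>
          simp [pvLoopA, pvStepA, ha]
      | cons a' l1 ih =>
        by_cases ha : PySem.Chars.isdigit a = true <;>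
          (simp [pvLoopA, pvStepA, ha, ih]; try ring)
  | case3 a l1 b l2 ih =>
    intro res cnt
    by_cases ha : PySem.Chars.isdigit a = true <;>
      by_cases hb : PySem.Chars.isdigit b = true <;>
        simp [pvLoopA, pvStepA, ha, hb, ih] <;> ring

lemma pvFilter_lengths (l : List Char) :
    (l.filter (fun c => !PySem.Chars.isdigit c)).length
      + (l.filter (fun c => PySem.Chars.isdigit c)).length = l.length := by
  induction l with
  | nil => simp
  | cons c l ih =>
    by_cases hc : PySem.Chars.isdigit c = true <;> simp [hc] <;> omega

-- ===== VERDICT (by name: the statement is the Claim_ definition above) =====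
theorem custom_blender_spec : Claim_equal_custom_blender := by
  intro s1 s2 _
  unfold Spec_custom_blender custom_blender custom_blender_alt
  simp only [pvLoopA_eq, pvMergeL_eq_zip, List.nil_append]
  have h := pvFilter_lengths (pvMergeL s1.toList s2.toList)
  simp only [Prod.mk.injEq, true_and]
  omega
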